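-- pv_equiv track=rewrite | github.com/Linzy2002/newblfq | test/basistest.py | _count_gg_basis
-- ===== SOURCE A (Python) =====
-- from math import ceil, floor
--
-- def _count_gg_basis(Nmax: int, Mj: int, K: int, color_states: int) -> int:
--     """Count only; uses same rules as generate_gg_basis (no object allocation)."""
--     kmax = K - 1
--     count = 0
--     for color_state in range(color_states):
--         for k1 in range(1, kmax + 1):
--             k2 = K - k1
--             for s2 in (-1, +1):
--                 for s1 in (-1, +1):
--                     target_m = Mj // 2 - s1 - s2
--                     max_n = Nmax // 2
--                     for n2 in range(max_n + 1):
--                         for n1 in range(max_n - n2 + 1):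
--                             lower = -floor(
--                                 (Nmax - 2 - 2 * n1 - 2 * n2 - target_m) / 2
--                             )
--                             upper = ceil(
--                                 (Nmax - 2 - 2 * n1 - 2 * n2 + target_m) / 2
--                             )
--                             for m1 in range(lower, upper + 1):
--                                 m2 = target_m - m1
--                                 N1 = 2 * n1 + abs(m1) + 1
--                                 N2 = 2 * n2 + abs(m2) + 1
--                                 if N1 + N2 > Nmax:
--                                     continue
--                                 count += 1
--     return count
-- ===== SOURCE B (Python) =====
-- def _count_gg_basis(Nmax: int, Mj: int, K: int, color_states: int) -> int:
--     """Count only; inner count is independent of color_state and k1, and of how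
--     n1+n2 splits, so compute one weighted pass per target_m and multiply."""
--     max_n = Nmax // 2
--
--     def inner(tm: int) -> int:
--         # states for one fixed (color_state, k1, s1, s2) with target_m == tm
--         total = 0
--         for s in range(max_n + 1):          # s = n1 + n2; it occurs in s+1 splits
--             R = Nmax - 2 - 2 * s
--             lower = -((R - tm) // 2)
--             upper = -((-(R + tm)) // 2)
--             c = 0
--             for m1 in range(lower, upper + 1):
--                 if abs(m1) + abs(tm - m1) <= R:
--                     c += 1
--             total += (s + 1) * c
--         return total
--
--     m0 = Mj // 2
--     mult = max(color_states, 0) * max(K - 1, 0)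
--     if mult == 0:
--         return 0
--     return mult * (inner(m0 + 2) + 2 * inner(m0) + inner(m0 - 2))
-- ===== Notes on version B (the rewrite author's own statement) =====
-- stated objective: faster
-- what changed: The nested loops over color_state, k1 and the (n1,n2) split collapse to arithmetic: the innermost tally depends only on target_m and s = n1+n2, so B does one weighted O(Nmax*Mrange) pass per distinct target_m (m0-2, m0, m0+2) and multiplies by max(color_states,0)*max(K-1,0).
import Mathlib
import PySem

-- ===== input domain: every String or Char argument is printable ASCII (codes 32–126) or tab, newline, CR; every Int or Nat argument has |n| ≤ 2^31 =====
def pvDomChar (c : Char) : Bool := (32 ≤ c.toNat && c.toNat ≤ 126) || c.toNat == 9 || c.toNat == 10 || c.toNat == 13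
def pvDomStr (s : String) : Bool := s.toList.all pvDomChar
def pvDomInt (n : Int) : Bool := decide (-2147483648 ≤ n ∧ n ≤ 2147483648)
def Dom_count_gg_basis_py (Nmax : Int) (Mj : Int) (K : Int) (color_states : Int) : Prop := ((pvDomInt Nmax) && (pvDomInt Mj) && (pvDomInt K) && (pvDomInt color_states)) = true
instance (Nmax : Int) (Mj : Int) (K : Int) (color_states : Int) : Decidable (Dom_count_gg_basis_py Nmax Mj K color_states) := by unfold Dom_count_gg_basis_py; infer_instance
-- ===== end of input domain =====

-- B counts the same basis states with the redundant loops replaced by arithmetic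
-- (the inner tally depends only on target_m and n1+n2), measured faster (asymptotically fewer iterations).

-- ===== PORT A =====
-- floor(x/2) / ceil(x/2) on Python floats are exact for |x| < 2^53 (true on Dom),
-- so they are ported as integer floor/ceiling division.
def count_gg_basis_py (Nmax : Int) (Mj : Int) (K : Int) (color_states : Int) : Int :=
  let kmax := K - 1
  (PySem.List.pyRange 0 color_states 1).foldl (fun count _color_state =>
    (PySem.List.pyRange 1 (kmax + 1) 1).foldl (fun count k1 =>
      let _k2 := K - k1
      [(-1 : Int), 1].foldl (fun count s2 =>
        [(-1 : Int), 1].foldl (fun count s1 =>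
          let target_m := PySem.Int.floordiv Mj 2 - s1 - s2
          let max_n := PySem.Int.floordiv Nmax 2
          (PySem.List.pyRange 0 (max_n + 1) 1).foldl (fun count n2 =>
            (PySem.List.pyRange 0 (max_n - n2 + 1) 1).foldl (fun count n1 =>
              let lower := -(PySem.Int.floordiv (Nmax - 2 - 2 * n1 - 2 * n2 - target_m) 2)
              let upper := -(PySem.Int.floordiv (-(Nmax - 2 - 2 * n1 - 2 * n2 + target_m)) 2)
              (PySem.List.pyRange lower (upper + 1) 1).foldl (fun count m1 =>
                let m2 := target_m - m1
                let N1 := 2 * n1 + |m1| + 1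
                let N2 := 2 * n2 + |m2| + 1
                if N1 + N2 > Nmax then count else count + 1) count) count) count) count) count) count) 0

-- ===== PORT B =====
-- helper 'inner' of Source B (a closure over Nmax and max_n)
def pvInnerB (Nmax : Int) (max_n : Int) (tm : Int) : Int :=
  (PySem.List.pyRange 0 (max_n + 1) 1).foldl (fun total s =>
    let R := Nmax - 2 - 2 * s
    let lower := -(PySem.Int.floordiv (R - tm) 2)
    let upper := -(PySem.Int.floordiv (-(R + tm)) 2)
    let c := (PySem.List.pyRange lower (upper + 1) 1).foldl (fun c m1 =>
      if |m1| + |tm - m1| ≤ R then c + 1 else c) 0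
    total + (s + 1) * c) 0

def count_gg_basis_py_alt (Nmax : Int) (Mj : Int) (K : Int) (color_states : Int) : Int :=
  let max_n := PySem.Int.floordiv Nmax 2
  let m0 := PySem.Int.floordiv Mj 2
  let mult := max color_states 0 * max (K - 1) 0
  if mult = 0 then 0
  else mult * (pvInnerB Nmax max_n (m0 + 2) + 2 * pvInnerB Nmax max_n m0 + pvInnerB Nmax max_n (m0 - 2))

-- ===== PRECONDITION & SPEC =====
def Spec_count_gg_basis_py (Nmax : Int) (Mj : Int) (K : Int) (color_states : Int) (out : Int) : Prop := out = count_gg_basis_py_alt Nmax Mj K color_states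
instance (Nmax : Int) (Mj : Int) (K : Int) (color_states : Int) (out : Int) : Decidable (Spec_count_gg_basis_py Nmax Mj K color_states out) := by unfold Spec_count_gg_basis_py; infer_instance

-- ===== CLAIM (what is proved, stated in full; the proofs are below) =====
def Claim_equal_count_gg_basis_py : Prop := ∀ (Nmax : Int) (Mj : Int) (K : Int) (color_states : Int), Dom_count_gg_basis_py Nmax Mj K color_states → Spec_count_gg_basis_py Nmax Mj K color_states (count_gg_basis_py Nmax Mj K color_states)

-- ===== LEMMAS AND PROOFS =====

-- the per-(n1,n2) inner tally of B, in B's (zeta-reduced) shape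
def pvC (Nmax tm s : Int) : Int :=
  (PySem.List.pyRange (-(PySem.Int.floordiv (Nmax - 2 - 2 * s - tm) 2))
      (-(PySem.Int.floordiv (-(Nmax - 2 - 2 * s + tm)) 2) + 1) 1).foldl (fun c m1 =>
    if |m1| + |tm - m1| ≤ Nmax - 2 - 2 * s then c + 1 else c) 0

theorem pvInnerB_eq (Nmax mx tm : Int) :
    pvInnerB Nmax mx tm
      = (PySem.List.pyRange 0 (mx + 1) 1).foldl (fun t s => t + (s + 1) * pvC Nmax tm s) 0 := rfl

-- a fold whose step shifts with the accumulator splits off its initial value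
theorem pv_foldl_shift {α : Type} (f : Int → α → Int)
    (h : ∀ a b x, f (a + b) x = a + f b x) :
    ∀ (l : List α) (a : Int), l.foldl f a = a + l.foldl f 0 := by
  intro l
  induction l with
  | nil => intro a; simp
  | cons x l ih =>
    intro a
    have hx : f a x = a + f 0 x := by simpa using h a 0 x
    simp only [List.foldl_cons]
    rw [hx, ih (a + f 0 x), ih (f 0 x)]
    ring

-- A's innermost m1 loop equals count + B's per-s tally at s = n1 + n2
theorem pv_m1_eq (Nmax tm n1 n2 count : Int) :
    (PySem.List.pyRange (-(PySem.Int.floordiv (Nmax - 2 - 2 * n1 - 2 * n2 - tm) 2))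
        (-(PySem.Int.floordiv (-(Nmax - 2 - 2 * n1 - 2 * n2 + tm)) 2) + 1) 1).foldl (fun count m1 =>
      if 2 * n1 + |m1| + 1 + (2 * n2 + |tm - m1| + 1) > Nmax then count else count + 1) count
    = count + pvC Nmax tm (n1 + n2) := by
  rw [pv_foldl_shift _ (by intro a b x; split_ifs <;> ring)]
  congr 1
  have e1 : Nmax - 2 - 2 * n1 - 2 * n2 - tm = Nmax - 2 - 2 * (n1 + n2) - tm := by ring
  have e2 : Nmax - 2 - 2 * n1 - 2 * n2 + tm = Nmax - 2 - 2 * (n1 + n2) + tm := by ring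
  rw [pvC, e1, e2]
  apply List.foldl_ext
  intro a m1 _
  dsimp only
  split_ifs <;> omega

-- ((List.range n).map g).sum as a Finset sum
theorem pv_sum_range (n : Nat) (g : Nat → Int) :
    ((List.range n).map g).sum = ∑ i ∈ Finset.range n, g i := rfl

-- the triangle ∑_{n2≤M} ∑_{n1≤M-n2} c(n1+n2) re-grouped by s = n1+n2
theorem pv_sum2 (c : Nat → Int) (M : Nat) :
    ∑ n2 ∈ Finset.range (M + 1), ∑ n1 ∈ Finset.range (M + 1 - n2), c (n1 + n2)
      = ∑ s ∈ Finset.range (M + 1), ((s : Int) + 1) * c s := by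
  induction M with
  | zero => simp
  | succ M ih =>
    have hrow : ∀ n2 ∈ Finset.range (M + 1),
        ∑ n1 ∈ Finset.range (M + 1 + 1 - n2), c (n1 + n2)
          = (∑ n1 ∈ Finset.range (M + 1 - n2), c (n1 + n2)) + c (M + 1) := by
      intro n2 hn2
      have h2 : n2 ≤ M := by simpa [Nat.lt_succ_iff] using hn2
      have hb : M + 1 + 1 - n2 = (M + 1 - n2) + 1 := by omega
      rw [hb, Finset.sum_range_succ]
      congr 2
      omega
    have h1 : M + 1 + 1 - (M + 1) = 1 := by omega
    conv_rhs => rw [Finset.sum_range_succ]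
    rw [Finset.sum_range_succ, Finset.sum_congr rfl hrow, Finset.sum_add_distrib, ih, h1,
      Finset.sum_range_one, Finset.sum_const, Finset.card_range, nsmul_eq_mul]
    simp only [zero_add]
    push_cast
    ring

-- sum of g over pyRange 0 b as a Finset sum
theorem pv_pyRange_sum (b : Int) (g : Int → Int) :
    ((PySem.List.pyRange 0 b 1).map g).sum = ∑ k ∈ Finset.range b.toNat, g (k : Int) := by
  rw [PySem.List.pyRange_one]
  simp only [List.map_map, zero_add, sub_zero]
  exact pv_sum_range _ _

-- the Int-range version of pv_sum2, over pyRange sums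
theorem pv_sum2_int (c : Int → Int) (mx : Int) :
    ((PySem.List.pyRange 0 (mx + 1) 1).map (fun n2 =>
        ((PySem.List.pyRange 0 (mx - n2 + 1) 1).map (fun n1 => c (n1 + n2))).sum)).sum
      = ((PySem.List.pyRange 0 (mx + 1) 1).map (fun s => (s + 1) * c s)).sum := by
  rw [pv_pyRange_sum, pv_pyRange_sum]
  have hrow : ∀ k ∈ Finset.range (mx + 1).toNat,
      ((PySem.List.pyRange 0 (mx - (k : Int) + 1) 1).map (fun n1 => c (n1 + (k : Int)))).sum
        = ∑ n1 ∈ Finset.range (mx - (k : Int) + 1).toNat, c ((n1 : Int) + (k : Int)) :=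
    fun k _ => pv_pyRange_sum _ _
  rw [Finset.sum_congr rfl hrow]
  by_cases h : 0 ≤ mx
  · obtain ⟨M, rfl⟩ : ∃ M : Nat, mx = (M : Int) := ⟨mx.toNat, (Int.toNat_of_nonneg h).symm⟩
    have hM1 : ((M : Int) + 1).toNat = M + 1 := by omega
    rw [hM1]
    have hrow2 : ∀ k ∈ Finset.range (M + 1),
        (∑ n1 ∈ Finset.range ((M : Int) - (k : Int) + 1).toNat, c ((n1 : Int) + (k : Int)))
          = ∑ n1 ∈ Finset.range (M + 1 - k), (fun n : Nat => c (n : Int)) (n1 + k) := by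
      intro k hk
      have hk' : k ≤ M := by simpa [Nat.lt_succ_iff] using hk
      have hb : ((M : Int) - (k : Int) + 1).toNat = M + 1 - k := by omega
      rw [hb]
      refine Finset.sum_congr rfl fun n1 _ => congrArg c ?_
      push_cast
      ring
    rw [Finset.sum_congr rfl hrow2, pv_sum2 (fun n : Nat => c (n : Int)) M]
  · have h0 : (mx + 1).toNat = 0 := by omega
    rw [h0]
    rfl

-- A's (n2, n1, m1) triple loop for a fixed target_m equals count + pvInnerB
theorem pvI_eq (Nmax tm count : Int) :
    (PySem.List.pyRange 0 (PySem.Int.floordiv Nmax 2 + 1) 1).foldl (fun count n2 =>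
      (PySem.List.pyRange 0 (PySem.Int.floordiv Nmax 2 - n2 + 1) 1).foldl (fun count n1 =>
        (PySem.List.pyRange (-(PySem.Int.floordiv (Nmax - 2 - 2 * n1 - 2 * n2 - tm) 2))
            (-(PySem.Int.floordiv (-(Nmax - 2 - 2 * n1 - 2 * n2 + tm)) 2) + 1) 1).foldl (fun count m1 =>
          if 2 * n1 + |m1| + 1 + (2 * n2 + |tm - m1| + 1) > Nmax then count else count + 1) count) count) count
    = count + pvInnerB Nmax (PySem.Int.floordiv Nmax 2) tm := by
  simp only [pv_m1_eq]
  simp only [PySem.List.foldl_add]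
  rw [pvInnerB_eq]
  simp only [PySem.List.foldl_add, zero_add]
  congr 1
  exact pv_sum2_int (pvC Nmax tm) (PySem.Int.floordiv Nmax 2)

-- a fold that adds a constant per element
theorem pv_foldl_const {α : Type} (l : List α) (c init : Int) :
    l.foldl (fun a _ => a + c) init = init + l.length * c := by
  rw [PySem.List.foldl_add l (fun _ => c) init]
  simp [mul_comm]

-- ===== VERDICT (by name: the statement is the Claim_ definition above) =====
theorem count_gg_basis_py_spec : Claim_equal_count_gg_basis_py := by
  intro Nmax Mj K color_states _hdom
  unfold Spec_count_gg_basis_py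
  simp only [count_gg_basis_py, count_gg_basis_py_alt, List.foldl_cons, List.foldl_nil]
  simp only [pvI_eq]
  have e1 : PySem.Int.floordiv Mj 2 - -1 - -1 = PySem.Int.floordiv Mj 2 + 2 := by ring
  have e2 : PySem.Int.floordiv Mj 2 - 1 - -1 = PySem.Int.floordiv Mj 2 := by ring
  have e3 : PySem.Int.floordiv Mj 2 - -1 - 1 = PySem.Int.floordiv Mj 2 := by ring
  have e4 : PySem.Int.floordiv Mj 2 - 1 - 1 = PySem.Int.floordiv Mj 2 - 2 := by ring
  simp only [e1, e2, e3, e4, add_assoc]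
  simp only [pv_foldl_const]
  simp only [PySem.List.length_pyRange_one]
  have hc : (((color_states - 0).toNat : Nat) : Int) = max color_states 0 := by omega
  have hk : (((K - 1 + 1 - 1).toNat : Nat) : Int) = max (K - 1) 0 := by omega
  rw [hc, hk]
  by_cases hm : max color_states 0 * max (K - 1) 0 = 0
  · rw [if_pos hm]
    rcases mul_eq_zero.mp hm with h | h <;> simp [h]
  · rw [if_neg hm]
    ring
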